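-- pv_equiv track=rewrite | github.com/Mark-Phillipson/talon_my_stuff | core/text_helpers.py | _remove_punct_chars
-- ===== SOURCE A (Python) =====
-- import unicodedata
--
-- def _remove_punct_chars(text: str, keep_apostrophe: bool = True, keep_hyphen: bool = True) -> str:
--     out = []
--     for ch in text:
--         cat = unicodedata.category(ch)
--         if cat.startswith("P") or cat.startswith("S"):
--             if ch == "'" and keep_apostrophe:
--                 out.append(ch)
--             elif ch == "-" and keep_hyphen:
--                 out.append(ch)
--             else:
--                 out.append(" ")
--         else:
--             out.append(ch)
--     return "".join(out)
-- ===== SOURCE B (Python) =====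
-- import string
--
-- def _remove_punct_chars(text: str, keep_apostrophe: bool = True, keep_hyphen: bool = True) -> str:
--     drop = set(string.punctuation)
--     if keep_apostrophe:
--         drop.discard("'")
--     if keep_hyphen:
--         drop.discard("-")
--     return "".join(" " if ch in drop else ch for ch in text)
-- ===== Notes on version B (the rewrite author's own statement) =====
-- stated objective: faster
-- what changed: B drops the per-character unicodedata classification entirely: it builds the drop-set once from string.punctuation (exactly the ASCII P/S characters of the stated domain), discards the kept apostrophe/hyphen, and maps each character through a set-membership test (measured ~5x faster: one cheap set lookup per char instead of a category-string test per char).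
import Mathlib
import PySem

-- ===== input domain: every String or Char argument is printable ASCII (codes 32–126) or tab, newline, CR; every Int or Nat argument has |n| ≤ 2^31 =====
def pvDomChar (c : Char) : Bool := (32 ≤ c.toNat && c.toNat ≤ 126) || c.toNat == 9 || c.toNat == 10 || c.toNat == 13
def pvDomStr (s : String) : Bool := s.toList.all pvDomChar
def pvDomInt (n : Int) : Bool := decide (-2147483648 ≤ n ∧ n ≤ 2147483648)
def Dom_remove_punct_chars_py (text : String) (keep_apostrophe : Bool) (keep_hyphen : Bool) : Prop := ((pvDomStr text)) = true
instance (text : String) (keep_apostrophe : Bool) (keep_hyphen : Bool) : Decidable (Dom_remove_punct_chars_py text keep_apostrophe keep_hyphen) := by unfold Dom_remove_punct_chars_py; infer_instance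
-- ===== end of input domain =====

-- B replaces A's per-character unicodedata classification by a drop-set built once from
-- string.punctuation (exactly the ASCII punctuation/symbol characters of the stated domain)
-- followed by a membership-test map; equivalence is claimed on the ASCII domain Dom.

-- ===== PORT A =====
-- hand port of unicodedata.category, exact on the stated domain (printable ASCII + tab/newline/CR);
-- returns "Cn" outside it, where nothing is claimed
def pyCategoryN (n : Nat) : String :=
  if n < 32 || n == 127 then "Cc"
  else if n == 32 then "Zs"
  else if n == 36 then "Sc"
  else if n == 40 || n == 91 || n == 123 then "Ps"
  else if n == 41 || n == 93 || n == 125 then "Pe"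
  else if n == 43 || (60 ≤ n && n ≤ 62) || n == 124 || n == 126 then "Sm"
  else if n == 45 then "Pd"
  else if n == 94 || n == 96 then "Sk"
  else if n == 95 then "Pc"
  else if (33 ≤ n && n ≤ 47) || n == 58 || n == 59 || n == 63 || n == 64 || n == 92 then "Po"
  else if 48 ≤ n && n ≤ 57 then "Nd"
  else if 65 ≤ n && n ≤ 90 then "Lu"
  else if 97 ≤ n && n ≤ 122 then "Ll"
  else "Cn"

def pyCategory (c : Char) : String := pyCategoryN c.toNat

def remove_punct_chars_py (text : String) (keep_apostrophe : Bool) (keep_hyphen : Bool) : String :=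
  let out : List Char := text.toList.foldl (fun out ch =>
    let cat := pyCategory ch
    if PySem.Str.startswith cat "P" || PySem.Str.startswith cat "S" then
      if ch == '\'' && keep_apostrophe then out ++ [ch]
      else if ch == '-' && keep_hyphen then out ++ [ch]
      else out ++ [' ']
    else out ++ [ch]) []
  String.mk out

-- ===== PORT B =====
-- string.punctuation, a fixed constant of the standard library
def pvStringPunctuation : String := "!\"#$%&'()*+,-./:;<=>?@[\\]^_`{|}~"

def remove_punct_chars_py_alt (text : String) (keep_apostrophe : Bool) (keep_hyphen : Bool) : String :=
  let drop : PySem.Set Char := PySem.Set.ofList pvStringPunctuation.toList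
  let drop := if keep_apostrophe then PySem.Set.discard drop '\'' else drop
  let drop := if keep_hyphen then PySem.Set.discard drop '-' else drop
  String.mk (text.toList.map (fun ch => if PySem.Set.contains drop ch then ' ' else ch))

-- ===== PRECONDITION & SPEC =====
def Spec_remove_punct_chars_py (text : String) (keep_apostrophe : Bool) (keep_hyphen : Bool) (out : String) : Prop := out = remove_punct_chars_py_alt text keep_apostrophe keep_hyphen
instance (text : String) (keep_apostrophe : Bool) (keep_hyphen : Bool) (out : String) : Decidable (Spec_remove_punct_chars_py text keep_apostrophe keep_hyphen out) := by unfold Spec_remove_punct_chars_py; infer_instance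

-- ===== CLAIM =====
def Claim_equal_remove_punct_chars_py : Prop := ∀ (text : String) (keep_apostrophe : Bool) (keep_hyphen : Bool), Dom_remove_punct_chars_py text keep_apostrophe keep_hyphen → Spec_remove_punct_chars_py text keep_apostrophe keep_hyphen (remove_punct_chars_py text keep_apostrophe keep_hyphen)

-- ===== LEMMAS AND PROOFS =====

-- the per-character value A appends
def pvAchar (keep_apostrophe keep_hyphen : Bool) (ch : Char) : Char :=
  if PySem.Str.startswith (pyCategory ch) "P" || PySem.Str.startswith (pyCategory ch) "S" then
    if ch == '\'' && keep_apostrophe then ch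
    else if ch == '-' && keep_hyphen then ch
    else ' '
  else ch

-- the per-character value B maps
def pvBchar (keep_apostrophe keep_hyphen : Bool) (ch : Char) : Char :=
  let drop : PySem.Set Char := PySem.Set.ofList pvStringPunctuation.toList
  let drop := if keep_apostrophe then PySem.Set.discard drop '\'' else drop
  let drop := if keep_hyphen then PySem.Set.discard drop '-' else drop
  if PySem.Set.contains drop ch then ' ' else ch

-- A's loop is a map
theorem A_eq_map (text : String) (ka kh : Bool) :
    remove_punct_chars_py text ka kh = String.mk (text.toList.map (pvAchar ka kh)) := by
  unfold remove_punct_chars_py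
  rw [show (fun (out : List Char) ch =>
      let cat := pyCategory ch
      if PySem.Str.startswith cat "P" || PySem.Str.startswith cat "S" then
        if ch == '\'' && ka then out ++ [ch]
        else if ch == '-' && kh then out ++ [ch]
        else out ++ [' ']
      else out ++ [ch]) = fun out ch => out ++ [pvAchar ka kh ch] from by
    funext out ch
    simp only [pvAchar]
    split <;> [skip; rfl]
    split <;> [rfl; skip]
    split <;> rfl]
  rw [PySem.List.foldl_append_singleton_eq_map]
  simp

-- pointwise agreement on the domain's code points
theorem char_agree_N : ∀ (ka kh : Bool), ∀ n : Nat, n < 128 →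
    pvAchar ka kh (Char.ofNat n) = pvBchar ka kh (Char.ofNat n) := by
  set_option maxRecDepth 4000 in decide

theorem domChar_lt (c : Char) (h : pvDomChar c = true) : c.toNat < 128 := by
  unfold pvDomChar at h
  simp only [Bool.or_eq_true, Bool.and_eq_true, decide_eq_true_eq, beq_iff_eq] at h
  omega

theorem char_agree (ka kh : Bool) (ch : Char) (h : ch.toNat < 128) :
    pvAchar ka kh ch = pvBchar ka kh ch := by
  have := char_agree_N ka kh ch.toNat h
  rwa [Char.ofNat_toNat] at this

-- ===== VERDICT =====
theorem remove_punct_chars_py_spec : Claim_equal_remove_punct_chars_py := by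
  intro text ka kh hdom
  unfold Spec_remove_punct_chars_py
  rw [A_eq_map]
  unfold remove_punct_chars_py_alt
  congr 1
  apply List.map_congr_left
  intro ch hmem
  have hch : pvDomChar ch = true := by
    unfold Dom_remove_punct_chars_py pvDomStr at hdom
    exact List.all_eq_true.mp hdom ch hmem
  exact char_agree ka kh ch (domChar_lt ch hch)
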